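-- pv_equiv track=rewrite | github.com/todd-schwartz/apcsa | HWCheck.py | Change_Binary_To_String_List
-- ===== SOURCE A (Python) =====
-- def Change_Binary_To_String_List(binary):
--     result=[]
--     tempStr = ""
--     if (len(binary) > 0):
--         for a in binary:
--             if (isinstance(a, str)):
--                 tempStr = tempStr + a
--             if (a > 8 and a < 127):
--                 c = chr(a)
--                 if (c != '\r'):
--                     if (c == '\n'):
--                         #remove trailing spaces, they are impossible to mark wrong since they are ambiguous in text
--                         tempStr = tempStr.rstrip()
--                         result.append("\"" + tempStr + "\"")
--                         tempStr = ""
--                     else: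
--                         tempStr = tempStr + str(c)
--             else:
--                 tempStr = tempStr + "utf(" + str(a) + ")"
--     return result
-- ===== SOURCE B (Python) =====
-- def Change_Binary_To_String_List(binary):
--     def enc(a):
--         if a == 10:
--             return '\n'
--         if a == 13:
--             return ''
--         if 8 < a and a < 127:
--             return chr(a)
--         return 'utf(' + str(a) + ')'
--     s = ''.join(enc(a) for a in binary)
--     return ['"' + seg.rstrip() + '"' for seg in s.split('\n')[:-1]]
-- ===== Notes on version B (the rewrite author's own statement) =====
-- stated objective: alternative
-- what changed: A walks the bytes with a mutable line buffer built by repeated string concatenation and emits a quoted line each time it sees byte 10; B maps each byte independently to its string fragment, joins them once, splits the joined string on ' ', drops the unterminated tail segment, and rstrips+quotes each remaining segment.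
import Mathlib
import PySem

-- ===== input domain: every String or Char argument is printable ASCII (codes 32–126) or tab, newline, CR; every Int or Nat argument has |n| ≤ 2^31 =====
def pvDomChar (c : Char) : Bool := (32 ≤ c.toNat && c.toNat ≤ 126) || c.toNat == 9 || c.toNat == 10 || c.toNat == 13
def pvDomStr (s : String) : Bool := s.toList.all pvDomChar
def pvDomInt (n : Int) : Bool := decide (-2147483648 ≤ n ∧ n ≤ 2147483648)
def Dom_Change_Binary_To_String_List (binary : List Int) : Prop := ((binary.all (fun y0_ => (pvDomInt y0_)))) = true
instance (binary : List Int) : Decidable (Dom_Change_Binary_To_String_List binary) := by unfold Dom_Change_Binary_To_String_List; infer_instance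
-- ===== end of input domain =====

-- B replaces A's emit-during-walk state machine by a transform(per byte)-then-split pipeline
-- (encode each byte, join, split on '\n', drop the unterminated tail, rstrip+quote each line);
-- objective: alternative decomposition; a timing run measured B faster (A concatenates strings repeatedly).

-- ===== PORT A =====
-- loop body of A's 'for a in binary' (the isinstance(a, str) branch is dead: elements are ints);
-- Python strings are carried as List Char, the appended lines as String.ofList of their chars.
def pvStepA (st : List String × List Char) (a : Int) : List String × List Char :=
  if 8 < a ∧ a < 127 then
    let c := Char.ofNat a.toNat
    if c = '\r' then st
    else if c = '\n' then (st.1 ++ [String.ofList ('"' :: PySem.Chars.rstrip st.2 ++ ['"'])], [])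
    else (st.1, st.2 ++ [c])
  else (st.1, st.2 ++ ('u' :: 't' :: 'f' :: '(' :: PySem.Int.toChars a ++ [')']))

def Change_Binary_To_String_List (binary : List Int) : List String :=
  if binary.length > 0 then (binary.foldl pvStepA ([], [])).1 else []

-- ===== PORT B =====
-- Source B's enc(a): the string fragment contributed by one byte
def pvEncB (a : Int) : List Char :=
  if a = 10 then ['\n']
  else if a = 13 then []
  else if 8 < a ∧ a < 127 then [Char.ofNat a.toNat]
  else 'u' :: 't' :: 'f' :: '(' :: PySem.Int.toChars a ++ [')']

def Change_Binary_To_String_List_alt (binary : List Int) : List String :=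
  let s := PySem.Chars.join [] (binary.map pvEncB)
  ((PySem.Chars.splitOn s ['\n']).dropLast).map
    (fun seg => String.ofList ('"' :: PySem.Chars.rstrip seg ++ ['"']))

-- ===== PRECONDITION & SPEC =====
def Spec_Change_Binary_To_String_List (binary : List Int) (out : List String) : Prop := out = Change_Binary_To_String_List_alt binary
instance (binary : List Int) (out : List String) : Decidable (Spec_Change_Binary_To_String_List binary out) := by unfold Spec_Change_Binary_To_String_List; infer_instance

-- ===== CLAIM (what is proved, stated in full; the proofs are below) =====
def Claim_equal_Change_Binary_To_String_List : Prop := ∀ (binary : List Int), Dom_Change_Binary_To_String_List binary → Spec_Change_Binary_To_String_List binary (Change_Binary_To_String_List binary)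

-- ===== LEMMAS AND PROOFS =====

-- proof-side model of splitting a char list on '\n' with an accumulator for the current segment
def pvSplit : List Char → List Char → List (List Char)
  | [], cur => [cur.reverse]
  | c :: rest, cur => if c = '\n' then cur.reverse :: pvSplit rest [] else pvSplit rest (c :: cur)

-- proof-side char-level step: flush on '\n', otherwise append
def pvCStep (st : List String × List Char) (c : Char) : List String × List Char :=
  if c = '\n' then (st.1 ++ [String.ofList ('"' :: PySem.Chars.rstrip st.2 ++ ['"'])], [])
  else (st.1, st.2 ++ [c])

lemma pvSplit_ne_nil (s cur : List Char) : pvSplit s cur ≠ [] := by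
  induction s generalizing cur with
  | nil => simp [pvSplit]
  | cons c rest ih =>
    simp only [pvSplit]
    split <;> simp [ih]

lemma digitChar_ne_newline (m : Nat) : Nat.digitChar m ≠ '\n' := by
  by_cases h : m < 16
  · interval_cases m <;> decide
  · have he : Nat.digitChar m = '*' := by
      simp only [Nat.digitChar]
      rw [if_neg (by omega), if_neg (by omega), if_neg (by omega), if_neg (by omega),
          if_neg (by omega), if_neg (by omega), if_neg (by omega), if_neg (by omega),
          if_neg (by omega), if_neg (by omega), if_neg (by omega), if_neg (by omega),
          if_neg (by omega), if_neg (by omega), if_neg (by omega), if_neg (by omega)]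
    rw [he]; decide

lemma toDigitsCore_no_newline (fuel n : Nat) (acc : List Char) (h : '\n' ∉ acc) :
    '\n' ∉ Nat.toDigitsCore 10 fuel n acc := by
  induction fuel generalizing n acc with
  | zero => simpa [Nat.toDigitsCore] using h
  | succ f ih =>
    simp only [Nat.toDigitsCore]
    split
    · simp [h, (digitChar_ne_newline (n % 10)).symm]
    · exact ih _ _ (by simp [h, (digitChar_ne_newline (n % 10)).symm])

lemma toChars_no_newline (a : Int) : '\n' ∉ PySem.Int.toChars a := by
  unfold PySem.Int.toChars
  split
  · simp only [List.mem_cons]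
    rintro (h | h)
    · exact absurd h (by decide)
    · exact toDigitsCore_no_newline _ _ _ (by simp) h
  · exact toDigitsCore_no_newline _ _ _ (by simp)

lemma foldl_cstep_no_newline (cs : List Char) (h : '\n' ∉ cs) (res : List String) (t : List Char) :
    cs.foldl pvCStep (res, t) = (res, t ++ cs) := by
  induction cs generalizing t with
  | nil => simp
  | cons c rest ih =>
    simp only [List.mem_cons, not_or] at h
    simp only [List.foldl_cons, pvCStep, if_neg (Ne.symm h.1)]
    rw [ih h.2]
    simp

-- A's per-int step does exactly what the char-level step does on B's fragment for that int
lemma step_eq_foldl_cstep (a : Int) (res : List String) (t : List Char) :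
    pvStepA (res, t) a = (pvEncB a).foldl pvCStep (res, t) := by
  by_cases hin : 8 < a ∧ a < 127
  · have h8 := hin.1
    have h127 := hin.2
    interval_cases a <;> simp [pvStepA, pvEncB, pvCStep]
  · have h10 : ¬ a = 10 := by rintro rfl; exact hin (by decide)
    have h13 : ¬ a = 13 := by rintro rfl; exact hin (by decide)
    simp only [pvStepA, pvEncB, if_neg hin, if_neg h10, if_neg h13]
    have hno : '\n' ∉ ('u' :: 't' :: 'f' :: '(' :: PySem.Int.toChars a ++ [')']) := by
      intro hm
      rcases List.mem_cons.1 hm with h|hm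
      · exact (by decide : ('\n':Char) ≠ 'u') h
      rcases List.mem_cons.1 hm with h|hm
      · exact (by decide : ('\n':Char) ≠ 't') h
      rcases List.mem_cons.1 hm with h|hm
      · exact (by decide : ('\n':Char) ≠ 'f') h
      rcases List.mem_cons.1 hm with h|hm
      · exact (by decide : ('\n':Char) ≠ '(') h
      rcases List.mem_append.1 hm with h|h
      · exact toChars_no_newline a h
      · exact (by decide : ('\n':Char) ≠ ')') (List.mem_singleton.1 h)
    rw [foldl_cstep_no_newline _ hno]

lemma foldl_stepA_eq (binary : List Int) (st : List String × List Char) :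
    binary.foldl pvStepA st = ((binary.map pvEncB).flatten).foldl pvCStep st := by
  induction binary generalizing st with
  | nil => simp
  | cons a rest ih =>
    simp only [List.foldl_cons, List.map_cons, List.flatten_cons, List.foldl_append]
    rw [← step_eq_foldl_cstep a st.1 st.2, ih]

lemma foldl_cstep_eq_pvSplit (s : List Char) (res : List String) (t : List Char) :
    s.foldl pvCStep (res, t) =
      (res ++ ((pvSplit s t.reverse).dropLast).map
          (fun seg => String.ofList ('"' :: PySem.Chars.rstrip seg ++ ['"'])),
        (pvSplit s t.reverse).getLastD []) := by
  induction s generalizing res t with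
  | nil => simp [pvSplit]
  | cons c rest ih =>
    by_cases hc : c = '\n'
    · subst hc
      show List.foldl pvCStep (pvCStep (res, t) '\n') rest = _
      rw [show pvCStep (res, t) '\n' =
            (res ++ [String.ofList ('"' :: PySem.Chars.rstrip t ++ ['"'])], []) from by
          simp [pvCStep]]
      rw [ih _ []]
      have hne := pvSplit_ne_nil rest ([] : List Char)
      have hlast : (t :: pvSplit rest []).getLast? = (pvSplit rest []).getLast? := by
        cases hsp : pvSplit rest [] with
        | nil => exact absurd hsp hne
        | cons x xs => simp [List.getLast?_cons_cons]
      simp [pvSplit, List.dropLast_cons_of_ne_nil hne, List.getLastD_eq_getLast?, hlast]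
    · show List.foldl pvCStep (pvCStep (res, t) c) rest = _
      rw [show pvCStep (res, t) c = (res, t ++ [c]) from by simp [pvCStep, hc]]
      rw [ih res (t ++ [c])]
      simp [pvSplit, hc]

lemma splitOn_go_eq (fuel : Nat) (l cur : List Char) (acc : List (List Char))
    (h : l.length < fuel) :
    PySem.Chars.splitOn.go ['\n'] fuel l cur acc = acc.reverse ++ pvSplit l cur := by
  induction fuel generalizing l cur acc with
  | zero => omega
  | succ f ih =>
    cases l with
    | nil => simp [PySem.Chars.splitOn.go, pvSplit]
    | cons c rest =>
      simp only [PySem.Chars.splitOn.go, pvSplit]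
      by_cases hc : c = '\n'
      · subst hc
        rw [if_pos (by simp [List.isPrefixOf])]
        simp only [List.length_singleton, List.drop_one, List.tail_cons]
        rw [ih rest [] (cur.reverse :: acc) (by simpa using Nat.lt_of_succ_lt_succ h)]
        simp
      · rw [if_neg (by simp [List.isPrefixOf, BEq.beq]; exact fun hx => absurd hx.symm hc),
            if_neg hc]
        exact ih rest (c :: cur) acc (by simpa using Nat.lt_of_succ_lt_succ h)

lemma splitOn_eq_pvSplit (s : List Char) :
    PySem.Chars.splitOn s ['\n'] = pvSplit s [] := by
  unfold PySem.Chars.splitOn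
  rw [splitOn_go_eq _ _ _ _ (by omega)]
  simp

lemma join_nil_eq_flatten (parts : List (List Char)) :
    PySem.Chars.join [] parts = parts.flatten := by
  induction parts with
  | nil => rfl
  | cons p rest ih =>
    cases rest with
    | nil => simp [PySem.Chars.join, List.intercalate]
    | cons q rest' =>
      simp only [PySem.Chars.join, List.intercalate] at *
      simp [List.intersperse] at *
      simpa using ih

-- ===== VERDICT (by name: the statement is the Claim_ definition above) =====
theorem Change_Binary_To_String_List_spec : Claim_equal_Change_Binary_To_String_List := by
  intro binary _
  show Change_Binary_To_String_List binary = Change_Binary_To_String_List_alt binary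
  unfold Change_Binary_To_String_List Change_Binary_To_String_List_alt
  simp only [join_nil_eq_flatten, splitOn_eq_pvSplit]
  cases binary with
  | nil => simp [pvSplit]
  | cons a rest =>
    simp only [List.length_cons, Nat.succ_pos, if_pos]
    rw [foldl_stepA_eq, foldl_cstep_eq_pvSplit]
    simp
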